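-- pv_equiv track=rewrite | github.com/Ldar72/pythonProject_2th_module | module_2_hard.py | find_divisible_pair
-- ===== SOURCE A (Python) =====
-- def find_divisible_pair(num):
--     pairs = []
--     for a in range(1, num):
--         for b in range(a + 1, num + 1):
--             if num % (a + b) == 0:
--                 pairs.append((a, b))
--
--     pairs.sort(key=lambda x: (x[0], x[1]))
--     return pairs
-- ===== SOURCE B (Python) =====
-- def find_divisible_pair(num):
--     # A pair (a, b), a < b <= num, qualifies iff d = a + b is a divisor of num.
--     # Collect the divisors once; for each a the qualifying b are d - a for the
--     # divisors d > 2*a, already in increasing order, so the grouped-by-a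
--     # comprehension is sorted by (a, b) and no sort is needed.
--     divs = [d for d in range(1, num + 1) if num % d == 0]
--     return [(a, d - a)
--             for a in range(1, (num - 1) // 2 + 1)
--             for d in divs if d > 2 * a]
-- ===== Notes on version B (the rewrite author's own statement) =====
-- stated objective: faster
-- what changed: B precomputes the divisor list of num in one linear pass and then, for each a, emits (a, d-a) for the divisors d > 2a, producing the output already in (a,b) order with no pair-by-pair divisibility test and no sort.
import Mathlib
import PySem

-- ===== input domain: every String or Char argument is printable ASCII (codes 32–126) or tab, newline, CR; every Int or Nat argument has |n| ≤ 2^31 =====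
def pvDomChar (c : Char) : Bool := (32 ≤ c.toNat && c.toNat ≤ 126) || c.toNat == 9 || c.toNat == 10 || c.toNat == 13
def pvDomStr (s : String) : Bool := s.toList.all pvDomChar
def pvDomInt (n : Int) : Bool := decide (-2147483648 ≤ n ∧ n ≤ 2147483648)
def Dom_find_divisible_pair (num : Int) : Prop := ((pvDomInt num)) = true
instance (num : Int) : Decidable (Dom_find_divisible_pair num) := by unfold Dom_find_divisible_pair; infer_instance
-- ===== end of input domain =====

-- B precomputes the divisor list of num once and emits, for each a, the pairs (a, d-a)
-- for divisors d > 2a — already in (a, b) order, so no per-pair test and no sort (objective: faster).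

-- ===== PORT A =====
def find_divisible_pair (num : Int) : List (Int × Int) :=
  let pairs := (PySem.List.pyRange 1 num 1).foldl (fun acc a =>
    (PySem.List.pyRange (a + 1) (num + 1) 1).foldl (fun acc b =>
      if PySem.Int.mod num (a + b) = 0 then acc ++ [(a, b)] else acc) acc) []
  PySem.List.sorted2 pairs (fun x => x.1) (fun x => x.2)

-- ===== PORT B =====
def find_divisible_pair_alt (num : Int) : List (Int × Int) :=
  let divs := (PySem.List.pyRange 1 (num + 1) 1).filter
    (fun d => decide (PySem.Int.mod num d = 0))
  (PySem.List.pyRange 1 (PySem.Int.floordiv (num - 1) 2 + 1) 1).flatMap (fun a =>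
    (divs.filter (fun d => decide (2 * a < d))).map (fun d => (a, d - a)))

-- ===== PRECONDITION & SPEC =====
def Spec_find_divisible_pair (num : Int) (out : List (Int × Int)) : Prop := out = find_divisible_pair_alt num
instance (num : Int) (out : List (Int × Int)) : Decidable (Spec_find_divisible_pair num out) := by unfold Spec_find_divisible_pair; infer_instance

-- ===== CLAIM (what is proved, stated in full; the proofs are below) =====
def Claim_equal_find_divisible_pair : Prop := ∀ (num : Int), Dom_find_divisible_pair num → Spec_find_divisible_pair num (find_divisible_pair num)

-- ===== LEMMAS AND PROOFS =====

-- sorted2 with integer component keys is sorted with the lexicographic key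
theorem sorted2_eq_sorted_lex {α : Type} (xs : List α) (k1 k2 : α → Int) :
    PySem.List.sorted2 xs k1 k2 = PySem.List.sorted xs (fun x => toLex (k1 x, k2 x)) := by
  show List.foldl _ [] xs = List.foldl _ [] xs
  congr 1
  funext acc x
  congr 1
  funext a b
  simp only [Prod.Lex.toLex_lt_toLex]
  by_cases h1 : k1 a < k1 b <;> by_cases h2 : k1 b < k1 a <;> by_cases h3 : k2 a < k2 b <;>
    simp [h1, h2, h3] <;> omega

-- A's pre-sort list in flatMap form
def pairsA (num : Int) : List (Int × Int) :=
  (PySem.List.pyRange 1 num 1).flatMap (fun a =>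
    ((PySem.List.pyRange (a + 1) (num + 1) 1).filter
        (fun b => decide (PySem.Int.mod num (a + b) = 0))).map (fun b => (a, b)))

theorem find_divisible_pair_eq (num : Int) :
    find_divisible_pair num = PySem.List.sorted2 (pairsA num) (fun x => x.1) (fun x => x.2) := by
  unfold find_divisible_pair pairsA
  simp only [PySem.List.foldl_append_ite]
  rw [show (fun (acc : List (Int × Int)) (a : Int) =>
        acc ++ ((PySem.List.pyRange (a + 1) (num + 1) 1).filter
          (fun b => decide (PySem.Int.mod num (a + b) = 0))).map (fun b => (a, b)))
      = (fun acc a => acc ++ (fun a => ((PySem.List.pyRange (a + 1) (num + 1) 1).filter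
          (fun b => decide (PySem.Int.mod num (a + b) = 0))).map (fun b => (a, b))) a) from rfl,
    PySem.List.foldl_append_eq_flatMap]
  simp

-- the characterising condition: (a, b) is collected iff 1 ≤ a < b ≤ num and (a+b) ∣ num
def IsPair (num a b : Int) : Prop := 1 ≤ a ∧ a < b ∧ b ≤ num ∧ (a + b) ∣ num

theorem mem_pairsA {num : Int} {p : Int × Int} : p ∈ pairsA num ↔ IsPair num p.1 p.2 := by
  obtain ⟨a, b⟩ := p
  simp only [pairsA, List.mem_flatMap, List.mem_map, List.mem_filter,
    PySem.List.mem_pyRange_one, decide_eq_true_eq, PySem.Int.mod_eq_zero_iff_dvd, IsPair]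
  constructor
  · rintro ⟨a', ⟨ha1, ha2⟩, b', ⟨⟨hb1, hb2⟩, hdvd⟩, heq⟩
    obtain ⟨rfl, rfl⟩ := Prod.mk.inj heq
    exact ⟨ha1, by omega, by omega, hdvd⟩
  · rintro ⟨h1, h2, h3, h4⟩
    exact ⟨a, ⟨h1, by omega⟩, b, ⟨⟨by omega, by omega⟩, h4⟩, rfl⟩

theorem mem_alt {num : Int} {p : Int × Int} :
    p ∈ find_divisible_pair_alt num ↔ IsPair num p.1 p.2 := by
  obtain ⟨a, b⟩ := p
  simp only [find_divisible_pair_alt, List.mem_flatMap, List.mem_map, List.mem_filter,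
    PySem.List.mem_pyRange_one, decide_eq_true_eq, PySem.Int.mod_eq_zero_iff_dvd, IsPair]
  constructor
  · rintro ⟨a', ⟨ha1, ha2⟩, d, ⟨⟨⟨hd1, hd2⟩, hdvd⟩, hgt⟩, heq⟩
    obtain ⟨rfl, rfl⟩ := Prod.mk.inj heq
    exact ⟨ha1, by omega, by omega, by rwa [show a' + (d - a') = d by ring]⟩
  · rintro ⟨h1, h2, h3, hdvd⟩
    have hle : a + b ≤ num := Int.le_of_dvd (by omega) hdvd
    have ha : a ≤ PySem.Int.floordiv (num - 1) 2 :=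
      (PySem.Int.le_floordiv_iff_mul_le (by omega)).mpr (by omega)
    exact ⟨a, ⟨h1, by omega⟩, a + b, ⟨⟨⟨by omega, by omega⟩, hdvd⟩, by omega⟩,
      by rw [add_sub_cancel_left]⟩

-- lexicographic key used by A's sort
theorem pairsA_pairwise (num : Int) :
    (pairsA num).Pairwise (fun p q =>
      (toLex (p.1, p.2) : Lex (Int × Int)) < toLex (q.1, q.2)) := by
  unfold pairsA
  rw [List.pairwise_flatMap]
  constructor
  · intro a _
    refine List.Pairwise.map _ (fun b c h => ?_)
      ((PySem.List.pairwise_lt_pyRange_one (a + 1) (num + 1)).filter _)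
    exact Prod.Lex.toLex_lt_toLex.mpr (Or.inr ⟨rfl, h⟩)
  · refine (PySem.List.pairwise_lt_pyRange_one 1 num).imp ?_
    rintro a1 a2 hlt x hx y hy
    simp only [List.mem_map] at hx hy
    obtain ⟨b1, _, rfl⟩ := hx
    obtain ⟨b2, _, rfl⟩ := hy
    exact Prod.Lex.toLex_lt_toLex.mpr (Or.inl hlt)

-- B's output is already in strictly increasing (a, b) order
theorem alt_pairwise (num : Int) :
    (find_divisible_pair_alt num).Pairwise (fun p q =>
      (toLex (p.1, p.2) : Lex (Int × Int)) < toLex (q.1, q.2)) := by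
  unfold find_divisible_pair_alt
  rw [List.pairwise_flatMap]
  constructor
  · intro a _
    refine List.Pairwise.map _ (fun d1 d2 h => ?_)
      (((PySem.List.pairwise_lt_pyRange_one 1 (num + 1)).filter _).filter _)
    exact Prod.Lex.toLex_lt_toLex.mpr (Or.inr ⟨rfl, by omega⟩)
  · refine (PySem.List.pairwise_lt_pyRange_one 1 _).imp ?_
    rintro a1 a2 hlt x hx y hy
    simp only [List.mem_map] at hx hy
    obtain ⟨d1, _, rfl⟩ := hx
    obtain ⟨d2, _, rfl⟩ := hy
    exact Prod.Lex.toLex_lt_toLex.mpr (Or.inl hlt)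

theorem pairsA_nodup (num : Int) : (pairsA num).Nodup :=
  (pairsA_pairwise num).imp (by rintro p q h rfl; exact absurd h (lt_irrefl _))

theorem alt_nodup (num : Int) : (find_divisible_pair_alt num).Nodup :=
  (alt_pairwise num).imp (by rintro p q h rfl; exact absurd h (lt_irrefl _))

theorem alt_perm_pairsA (num : Int) : (find_divisible_pair_alt num).Perm (pairsA num) :=
  (List.perm_ext_iff_of_nodup (alt_nodup num) (pairsA_nodup num)).mpr
    (fun _ => mem_alt.trans mem_pairsA.symm)

-- ===== VERDICT (by name: the statement is the Claim_ definition above) =====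
theorem find_divisible_pair_spec : Claim_equal_find_divisible_pair := by
  intro num _
  show find_divisible_pair num = find_divisible_pair_alt num
  rw [find_divisible_pair_eq, sorted2_eq_sorted_lex,
    PySem.List.sorted_eq_of_perm_of_pairwise_lt (pairsA num) (find_divisible_pair_alt num) _
      (alt_perm_pairsA num) (alt_pairwise num)]
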